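-- pv_equiv track=rewrite | github.com/jrnijboer/AdventOfCode | 2023/python/day13.py | isMirrorOnColumn
-- ===== SOURCE A (Python) =====
-- def isMirrorOnColumn(pattern, allowedErrors=0):
--     for i in range(1, len(pattern[0])):
--         errors = 0
--         for row in pattern:
--             left = row[:i][::-1]
--             right = row[i:]
--             if not left.startswith(right) and not right.startswith(left):
--                 errors += 1
--         if errors == allowedErrors:
--             return i
--     return 0
-- ===== SOURCE B (Python) =====
-- def isMirrorOnColumn(pattern, allowedErrors=0):
--     width = len(pattern[0])
--     errs = [0] * width
--     for row in pattern:
--         L = len(row)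
--         for i in range(1, width):
--             k = min(i, L - i)
--             if any(row[i - 1 - j] != row[i + j] for j in range(k)):
--                 errs[i] += 1
--     for i in range(1, width):
--         if errs[i] == allowedErrors:
--             return i
--     return 0
-- ===== Notes on version B (the rewrite author's own statement) =====
-- stated objective: alternative
-- what changed: B swaps the loop order (rows outer, columns inner), keeps a per-column error-count array, and tests each reflection by direct character comparisons expanding around the fold line instead of building reversed/sliced strings and calling startswith twice per (column,row).
import Mathlib
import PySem

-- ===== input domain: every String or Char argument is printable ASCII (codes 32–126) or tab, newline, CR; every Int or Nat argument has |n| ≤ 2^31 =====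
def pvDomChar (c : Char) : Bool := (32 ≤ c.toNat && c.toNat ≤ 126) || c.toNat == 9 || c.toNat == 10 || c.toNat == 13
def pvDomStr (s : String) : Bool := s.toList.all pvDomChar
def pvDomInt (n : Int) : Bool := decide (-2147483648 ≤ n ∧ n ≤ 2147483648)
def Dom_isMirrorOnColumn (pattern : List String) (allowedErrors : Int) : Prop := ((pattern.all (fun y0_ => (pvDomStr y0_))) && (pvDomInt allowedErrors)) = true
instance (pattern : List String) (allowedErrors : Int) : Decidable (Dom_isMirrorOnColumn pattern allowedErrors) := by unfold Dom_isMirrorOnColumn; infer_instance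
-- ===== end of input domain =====

-- B replaces A's per-column slice/reverse/startswith test by a rows-outer pass that compares
-- characters around each fold line into a per-column error-count array (objective: alternative decomposition).

-- ===== PORT A =====
-- one step of A's inner 'for row in pattern' loop, for fold column i
def pvARowStep (i : Int) (errors : Int) (row : String) : Int :=
  -- left = row[:i][::-1]  ([::-1] is reverse, PySem.List.slice?_none_none_neg_one)
  let left := (PySem.List.slice row.toList none (some i)).reverse
  -- right = row[i:]
  let right := PySem.List.slice row.toList (some i) none
  if !PySem.Chars.startswith left right && !PySem.Chars.startswith right left then errors + 1
  else errors

-- A's outer 'for i in range(1, len(pattern[0]))' loop with its early return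
def pvAFind (pattern : List String) (allowedErrors : Int) : List Int → Int
  | [] => 0
  | i :: rest =>
    let errors := pattern.foldl (fun errors row => pvARowStep i errors row) 0
    if errors = allowedErrors then i else pvAFind pattern allowedErrors rest

def isMirrorOnColumn (pattern : List String) (allowedErrors : Int) : Int :=
  -- pattern[0] raises IndexError on [] (excluded by Pre_); the .getD "" is never reached inside Pre_
  pvAFind pattern allowedErrors
    (PySem.List.pyRange 1 (((PySem.List.pyGet? pattern 0).getD "").toList.length : Int) 1)

-- ===== PORT B =====
-- any(row[i-1-j] != row[i+j] for j in range(k)) with k = min(i, L-i); Python's k may be negative,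
-- Nat subtraction gives k = 0 then — range(k) is empty either way, so this is exact
def pvBMismatch (cs : List Char) (i : Nat) : Bool :=
  let k := min i (cs.length - i)
  (List.range k).any (fun j => cs.getD (i - 1 - j) ' ' != cs.getD (i + j) ' ')

-- B's inner 'for i in range(1, width)' loop: errs[i] += 1 on a mismatched row
-- (range(1, width) = List.range' 1 (width - 1), exact for a Nat width)
def pvBRow (width : Nat) (errs : List Int) (cs : List Char) : List Int :=
  (List.range' 1 (width - 1)).foldl
    (fun errs i => if pvBMismatch cs i then errs.set i (errs.getD i 0 + 1) else errs) errs

-- B's final scan 'for i in range(1, width): if errs[i] == allowedErrors: return i'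
def pvBScan (errs : List Int) (allowedErrors : Int) : List Nat → Int
  | [] => 0
  | i :: rest => if errs.getD i 0 = allowedErrors then (i : Int) else pvBScan errs allowedErrors rest

def isMirrorOnColumn_alt (pattern : List String) (allowedErrors : Int) : Int :=
  let width := ((PySem.List.pyGet? pattern 0).getD "").toList.length
  let errs := pattern.foldl (fun errs row => pvBRow width errs row.toList) (List.replicate width 0)
  pvBScan errs allowedErrors (List.range' 1 (width - 1))

-- ===== PRECONDITION & SPEC =====
-- A evaluates pattern[0]: on the empty list it raises IndexError, so Pre_ excludes exactly pattern = []
def Pre_isMirrorOnColumn (pattern : List String) (allowedErrors : Int) : Prop := pattern ≠ []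
instance (pattern : List String) (allowedErrors : Int) : Decidable (Pre_isMirrorOnColumn pattern allowedErrors) := by unfold Pre_isMirrorOnColumn; infer_instance
def pvWitness_isMirrorOnColumn : List String × Int := (["#..#", ".##."], 0)

def Spec_isMirrorOnColumn (pattern : List String) (allowedErrors : Int) (out : Int) : Prop := out = isMirrorOnColumn_alt pattern allowedErrors
instance (pattern : List String) (allowedErrors : Int) (out : Int) : Decidable (Spec_isMirrorOnColumn pattern allowedErrors out) := by unfold Spec_isMirrorOnColumn; infer_instance

-- ===== CLAIM (what is proved, stated in full; the proofs are below) =====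
def Claim_equal_isMirrorOnColumn : Prop := ∀ (pattern : List String) (allowedErrors : Int), Dom_isMirrorOnColumn pattern allowedErrors → Pre_isMirrorOnColumn pattern allowedErrors → Spec_isMirrorOnColumn pattern allowedErrors (isMirrorOnColumn pattern allowedErrors)

-- ===== LEMMAS AND PROOFS =====

-- two lists are mutually prefix-comparable iff they agree on their common length
lemma pv_prefix_or_iff (l r : List Char) :
    (r <+: l ∨ l <+: r) ↔ ∀ j < min l.length r.length, l.getD j ' ' = r.getD j ' ' := by
  induction l generalizing r with
  | nil => simp
  | cons a l ih =>
    cases r with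
    | nil => simp
    | cons b r =>
      simp only [List.cons_prefix_cons]
      constructor
      · rintro (⟨hab, h⟩ | ⟨hab, h⟩) j hj
        all_goals cases j with
        | zero => simp [hab]
        | succ j =>
          simp only [List.length_cons, Nat.succ_min_succ] at hj
          simpa using (ih r).1 (by tauto) j (by omega)
      · intro h
        have hab : a = b := by simpa using h 0 (by simp)
        have := (ih r).2 (fun j hj => by simpa using h (j+1) (by simpa [Nat.succ_min_succ] using Nat.succ_lt_succ hj))
        tauto

-- A's per-row reflection test = B's charwise test
lemma pv_row_eq (cs : List Char) (i : Nat) :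
    (!PySem.Chars.startswith (cs.take i).reverse (cs.drop i)
      && !PySem.Chars.startswith (cs.drop i) (cs.take i).reverse) = pvBMismatch cs i := by
  rw [Bool.eq_iff_iff]
  have hb : ∀ x y : Bool, ((!x && !y) = true ↔ ¬(x = true ∨ y = true)) := by decide
  rw [hb]
  have hk : min ((cs.take i).reverse).length (cs.drop i).length = min i (cs.length - i) := by
    simp
  have hidx : ∀ j < min i (cs.length - i),
      ((cs.take i).reverse).getD j ' ' = cs.getD (i - 1 - j) ' ' ∧
      (cs.drop i).getD j ' ' = cs.getD (i + j) ' ' := by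
    intro j hj
    have h1 : j < i := lt_of_lt_of_le hj (Nat.min_le_left _ _)
    have h2 : j < cs.length - i := lt_of_lt_of_le hj (Nat.min_le_right _ _)
    have hilen : i < cs.length := by omega
    constructor
    · have hjl : j < ((cs.take i).reverse).length := by simp; omega
      rw [List.getD_eq_getElem _ _ hjl, List.getElem_reverse, List.getElem_take,
        List.getD_eq_getElem _ _ (by omega : i - 1 - j < cs.length)]
      congr 1
      simp
      omega
    · have hjl : j < (cs.drop i).length := by simp; omega
      rw [List.getD_eq_getElem _ _ hjl, List.getElem_drop,
        List.getD_eq_getElem _ _ (by omega : i + j < cs.length)]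
  constructor
  · intro h
    rw [PySem.Chars.startswith_iff, PySem.Chars.startswith_iff, pv_prefix_or_iff, hk] at h
    push Not at h
    obtain ⟨j, hj, hne⟩ := h
    simp only [pvBMismatch, List.any_eq_true, List.mem_range, bne_iff_ne]
    exact ⟨j, hj, by rw [← (hidx j hj).1, ← (hidx j hj).2]; exact hne⟩
  · intro h
    rw [PySem.Chars.startswith_iff, PySem.Chars.startswith_iff, pv_prefix_or_iff, hk]
    push Not
    simp only [pvBMismatch, List.any_eq_true, List.mem_range, bne_iff_ne] at h
    obtain ⟨j, hj, hne⟩ := h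
    exact ⟨j, hj, by rw [(hidx j hj).1, (hidx j hj).2]; exact hne⟩

-- B's inner loop preserves the length of the error array
lemma pv_len_foldl (cs : List Char) (is : List Nat) (errs : List Int) :
    (is.foldl (fun e i => if pvBMismatch cs i then e.set i (e.getD i 0 + 1) else e) errs).length
      = errs.length := by
  induction is generalizing errs with
  | nil => rfl
  | cons i is ih =>
    simp only [List.foldl_cons]
    split
    · rw [ih, List.length_set]
    · rw [ih]

-- positions outside the index list are untouched by B's inner loop
lemma pv_foldl_notmem (cs : List Char) (is : List Nat) (errs : List Int) (t : Nat) (ht : t ∉ is) :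
    (is.foldl (fun e i => if pvBMismatch cs i then e.set i (e.getD i 0 + 1) else e) errs).getD t 0
      = errs.getD t 0 := by
  induction is generalizing errs with
  | nil => rfl
  | cons i is ih =>
    simp only [List.mem_cons, not_or] at ht
    simp only [List.foldl_cons]
    rw [ih _ ht.2]
    split
    · simp [List.getD, List.getElem?_set_ne (Ne.symm ht.1)]
    · rfl

-- a distinct index list bumps position t exactly once
lemma pv_foldl_mem (cs : List Char) (is : List Nat) (errs : List Int) (t : Nat)
    (hnd : is.Nodup) (ht : t ∈ is) (hlt : t < errs.length) :
    (is.foldl (fun e i => if pvBMismatch cs i then e.set i (e.getD i 0 + 1) else e) errs).getD t 0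
      = errs.getD t 0 + (if pvBMismatch cs t then 1 else 0) := by
  induction is generalizing errs with
  | nil => cases ht
  | cons i is ih =>
    simp only [List.nodup_cons] at hnd
    simp only [List.foldl_cons]
    by_cases hit : i = t
    · subst hit
      rw [pv_foldl_notmem cs is _ i hnd.1]
      split
      · simp [List.getD, hlt]
      · simp
    · have ht' : t ∈ is := by cases ht with
        | head => exact absurd rfl hit
        | tail _ h => exact h
      have hlt' : t < (if pvBMismatch cs i then errs.set i (errs.getD i 0 + 1) else errs).length := by
        split <;> simpa
      rw [ih _ hnd.2 ht' hlt']
      congr 1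
      split
      · simp [List.getD, List.getElem?_set_ne hit]
      · rfl

lemma pv_bRow_getD (cs : List Char) (width : Nat) (errs : List Int) (t : Nat)
    (h1 : 1 ≤ t) (h2 : t < width) (hlen : errs.length = width) :
    (pvBRow width errs cs).getD t 0 = errs.getD t 0 + (if pvBMismatch cs t then 1 else 0) := by
  apply pv_foldl_mem
  · exact List.nodup_range'
  · rw [List.mem_range'_1]; omega
  · omega

lemma pv_bRow_len (cs : List Char) (width : Nat) (errs : List Int) :
    (pvBRow width errs cs).length = errs.length := pv_len_foldl cs _ errs

-- after the row pass, position t of the array holds its start value plus the number of bad rows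
lemma pv_outer (width : Nat) (pattern : List String) (errs : List Int) (t : Nat)
    (h1 : 1 ≤ t) (h2 : t < width) (hlen : errs.length = width) :
    (pattern.foldl (fun errs row => pvBRow width errs row.toList) errs).getD t 0
      = errs.getD t 0 + (pattern.countP (fun row => pvBMismatch row.toList t) : Int) := by
  induction pattern generalizing errs with
  | nil => simp
  | cons row pattern ih =>
    simp only [List.foldl_cons]
    rw [ih _ (by rw [pv_bRow_len]; exact hlen), pv_bRow_getD row.toList width errs t h1 h2 hlen,
      List.countP_cons]
    split <;> simp <;> ring

-- A's per-row step in terms of B's test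
lemma pv_aRowStep_eq (row : String) (n : Nat) (errors : Int) :
    pvARowStep (n : Int) errors row
      = if pvBMismatch row.toList n then errors + 1 else errors := by
  rw [pvARowStep]
  simp only [PySem.List.slice_to_natCast, PySem.List.slice_from_natCast]
  rw [pv_row_eq]

-- A's inner fold counts the bad rows
lemma pv_errors_eq (pattern : List String) (n : Nat) :
    pattern.foldl (fun errors row => pvARowStep (n : Int) errors row) 0
      = (pattern.countP (fun row => pvBMismatch row.toList n) : Int) := by
  have : (fun (errors : Int) (row : String) => pvARowStep (n : Int) errors row)
      = fun errors row => if pvBMismatch row.toList n then errors + 1 else errors := by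
    funext errors row; exact pv_aRowStep_eq row n errors
  rw [this]
  simpa using PySem.List.foldl_count_if (fun row => pvBMismatch row.toList n) pattern 0

-- A's early-return scan = B's scan over the error array, given the counts match
lemma pv_scan_eq (pattern : List String) (allowedErrors : Int) (errs : List Int) (width : Nat)
    (H : ∀ t, 1 ≤ t → t < width →
      ((pattern.countP (fun row => pvBMismatch row.toList t) : Int)) = errs.getD t 0) :
    ∀ js : List Nat, (∀ k ∈ js, 1 ≤ k ∧ k < width) →
      pvAFind pattern allowedErrors (js.map (fun (k : Nat) => (k : Int)))
        = pvBScan errs allowedErrors js := by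
  intro js
  induction js with
  | nil => intro _; rfl
  | cons k js ih =>
    intro hmem
    have hk := hmem k (List.mem_cons_self ..)
    rw [List.map_cons, pvAFind, pvBScan, pv_errors_eq pattern k, H k hk.1 hk.2]
    split
    · rfl
    · exact ih (fun k hk => hmem k (List.mem_cons_of_mem _ hk))

-- ===== VERDICT (by name: the statement is the Claim_ definition above) =====
theorem isMirrorOnColumn_spec : Claim_equal_isMirrorOnColumn := by
  intro pattern allowedErrors _ _
  unfold Spec_isMirrorOnColumn isMirrorOnColumn isMirrorOnColumn_alt
  set width := ((PySem.List.pyGet? pattern 0).getD "").toList.length with hwidth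
  have hrange : PySem.List.pyRange 1 (width : Int) 1
      = (List.range' 1 (width - 1)).map (fun (k : Nat) => (k : Int)) := by
    rw [PySem.List.pyRange_one, List.range'_eq_map_range, List.map_map]
    have h1 : ((width : Int) - 1).toNat = width - 1 := by omega
    rw [h1]
    apply List.map_congr_left
    intro k _
    simp
  rw [hrange]
  apply pv_scan_eq pattern allowedErrors _ width
  · intro t h1 h2
    rw [pv_outer width pattern _ t h1 h2 (by simp)]
    simp [h2]
  · intro k hk
    rw [List.mem_range'_1] at hk
    omega
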